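-- pv_equiv track=rewrite | github.com/sang731/wumpus-world-game | src/entities/sensory.py | has_stench
-- ===== SOURCE A (Python) =====
-- def has_stench(player_pos, wumpus_pos, wumpus_alive, n):
--     if not wumpus_alive:
--         return False
--     x,y = player_pos
--     for dx,dy in [(1,0),(-1,0),(0,1),(0,-1)]:
--         nx,ny = x+dx, y+dy
--         if 1 <= nx <= n and 1 <= ny <= n and (nx,ny) == wumpus_pos:
--             return True
--     return False
-- ===== SOURCE B (Python) =====
-- def has_stench(player_pos, wumpus_pos, wumpus_alive, n):
--     if not wumpus_alive:
--         return False
--     x, y = player_pos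
--     wx, wy = wumpus_pos
--     return 1 <= wx <= n and 1 <= wy <= n and abs(wx - x) + abs(wy - y) == 1
-- ===== Notes on version B (the rewrite author's own statement) =====
-- stated objective: simpler
-- what changed: Replaces the four-neighbor loop with a closed-form test: wumpus_pos in bounds and at Manhattan distance 1 from player_pos.
import Mathlib
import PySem

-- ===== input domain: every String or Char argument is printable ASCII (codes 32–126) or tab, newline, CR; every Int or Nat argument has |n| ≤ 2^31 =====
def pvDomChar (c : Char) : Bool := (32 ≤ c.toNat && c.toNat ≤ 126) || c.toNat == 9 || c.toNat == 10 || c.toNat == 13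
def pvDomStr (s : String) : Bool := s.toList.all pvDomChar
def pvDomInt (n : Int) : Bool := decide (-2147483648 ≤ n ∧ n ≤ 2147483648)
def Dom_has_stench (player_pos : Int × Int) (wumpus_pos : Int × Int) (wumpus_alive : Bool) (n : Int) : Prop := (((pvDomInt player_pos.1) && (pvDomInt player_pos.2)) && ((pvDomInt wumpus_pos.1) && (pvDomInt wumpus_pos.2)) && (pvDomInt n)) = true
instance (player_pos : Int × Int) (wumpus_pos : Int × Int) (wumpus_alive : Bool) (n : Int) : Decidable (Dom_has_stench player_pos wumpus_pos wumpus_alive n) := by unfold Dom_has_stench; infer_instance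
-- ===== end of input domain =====

-- B replaces A's four-neighbor loop with a closed-form bounds + Manhattan-distance-1 test (simpler).

-- ===== PORT A =====
-- the for-loop with early return, transcribed as structural recursion over the same delta list
def has_stench_loop (x y : Int) (wumpus_pos : Int × Int) (n : Int) : List (Int × Int) → Bool
  | [] => false
  | (dx, dy) :: rest =>
      let nx := x + dx
      let ny := y + dy
      if 1 ≤ nx ∧ nx ≤ n ∧ 1 ≤ ny ∧ ny ≤ n ∧ (nx, ny) = wumpus_pos then true
      else has_stench_loop x y wumpus_pos n rest

def has_stench (player_pos : Int × Int) (wumpus_pos : Int × Int) (wumpus_alive : Bool) (n : Int) : Bool :=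
  if !wumpus_alive then false
  else
    let x := player_pos.1
    let y := player_pos.2
    has_stench_loop x y wumpus_pos n [(1,0),(-1,0),(0,1),(0,-1)]

-- ===== PORT B =====
def has_stench_alt (player_pos : Int × Int) (wumpus_pos : Int × Int) (wumpus_alive : Bool) (n : Int) : Bool :=
  if !wumpus_alive then false
  else
    let x := player_pos.1
    let y := player_pos.2
    let wx := wumpus_pos.1
    let wy := wumpus_pos.2
    decide (1 ≤ wx ∧ wx ≤ n ∧ 1 ≤ wy ∧ wy ≤ n ∧ (wx - x).natAbs + (wy - y).natAbs = 1)

-- ===== PRECONDITION & SPEC =====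
def Spec_has_stench (player_pos : Int × Int) (wumpus_pos : Int × Int) (wumpus_alive : Bool) (n : Int) (out : Bool) : Prop := out = has_stench_alt player_pos wumpus_pos wumpus_alive n
instance (player_pos : Int × Int) (wumpus_pos : Int × Int) (wumpus_alive : Bool) (n : Int) (out : Bool) : Decidable (Spec_has_stench player_pos wumpus_pos wumpus_alive n out) := by unfold Spec_has_stench; infer_instance

-- ===== CLAIM (what is proved, stated in full; the proofs are below) =====
def Claim_equal_has_stench : Prop := ∀ (player_pos : Int × Int) (wumpus_pos : Int × Int) (wumpus_alive : Bool) (n : Int), Dom_has_stench player_pos wumpus_pos wumpus_alive n → Spec_has_stench player_pos wumpus_pos wumpus_alive n (has_stench player_pos wumpus_pos wumpus_alive n)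

-- ===== LEMMAS AND PROOFS =====
theorem has_stench_loop_eq_closed (x y wx wy n : Int) :
    has_stench_loop x y (wx, wy) n [(1,0),(-1,0),(0,1),(0,-1)] =
      decide (1 ≤ wx ∧ wx ≤ n ∧ 1 ≤ wy ∧ wy ≤ n ∧ (wx - x).natAbs + (wy - y).natAbs = 1) := by
  simp only [has_stench_loop, Prod.mk.injEq]
  split_ifs <;> (rw [eq_comm]; simp only [decide_eq_true_eq, decide_eq_false_iff_not]) <;> omega

theorem has_stench_eq_alt (player_pos wumpus_pos : Int × Int) (wumpus_alive : Bool) (n : Int) :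
    has_stench player_pos wumpus_pos wumpus_alive n = has_stench_alt player_pos wumpus_pos wumpus_alive n := by
  obtain ⟨x, y⟩ := player_pos
  obtain ⟨wx, wy⟩ := wumpus_pos
  cases wumpus_alive with
  | false => rfl
  | true =>
    simpa only [has_stench, has_stench_alt] using has_stench_loop_eq_closed x y wx wy n

-- ===== VERDICT (by name: the statement is the Claim_ definition above) =====
theorem has_stench_spec : Claim_equal_has_stench := by
  intro p w a n _
  unfold Spec_has_stench
  exact has_stench_eq_alt p w a n
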